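-- pv_equiv track=rewrite | github.com/yjcyxky/research-hub-mcp | python/rust_research_py/text2table/text2table.py | _find_tsv_tables
-- ===== SOURCE A (Python) =====
-- from typing import Any, Awaitable, Callable, Dict, List, Optional, Sequence, Tuple, TYPE_CHECKING, Union
--
-- def _find_tsv_tables(text: str) -> List[Tuple[List[str], List[List[str]]]]:
--     if not text:
--         return []
--     lines = [line.strip() for line in text.splitlines() if line.strip()]
--     if not lines:
--         return []
--     blocks: List[List[str]] = []
--     current: List[str] = []
--     for line in lines:
--         if "\t" in line:
--             current.append(line)
--         else:
--             if current:
--                 blocks.append(current)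
--                 current = []
--     if current:
--         blocks.append(current)
--
--     tables: List[Tuple[List[str], List[List[str]]]] = []
--     for block in blocks:
--         headers = [h.strip() for h in block[0].split("\t")]
--         rows = [[c.strip() for c in line.split("\t")] for line in block[1:]]
--         tables.append((headers, rows))
--     return tables
-- ===== SOURCE B (Python) =====
-- def _parse_row(line):
--     return [c.strip() for c in line.split("\t")]
--
-- def _find_tsv_tables(text):
--     lines = [line.strip() for line in text.splitlines() if line.strip()]
--     tables = []
--     i, n = 0, len(lines)
--     while i < n:
--         if "\t" in lines[i]:
--             j = i + 1
--             while j < n and "\t" in lines[j]: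
--                 j += 1
--             tables.append((_parse_row(lines[i]), [_parse_row(l) for l in lines[i + 1:j]]))
--             i = j
--         else:
--             i += 1
--     return tables
-- ===== Notes on version B (the rewrite author's own statement) =====
-- stated objective: simpler
-- what changed: B fuses A's two passes (accumulate blocks with a trailing flush, then parse each block) into one pass that scans each run of tab-containing lines in place and emits the parsed (headers, rows) table directly, removing the intermediate blocks list, the current-block accumulator and the end-of-loop flush.
import Mathlib
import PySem

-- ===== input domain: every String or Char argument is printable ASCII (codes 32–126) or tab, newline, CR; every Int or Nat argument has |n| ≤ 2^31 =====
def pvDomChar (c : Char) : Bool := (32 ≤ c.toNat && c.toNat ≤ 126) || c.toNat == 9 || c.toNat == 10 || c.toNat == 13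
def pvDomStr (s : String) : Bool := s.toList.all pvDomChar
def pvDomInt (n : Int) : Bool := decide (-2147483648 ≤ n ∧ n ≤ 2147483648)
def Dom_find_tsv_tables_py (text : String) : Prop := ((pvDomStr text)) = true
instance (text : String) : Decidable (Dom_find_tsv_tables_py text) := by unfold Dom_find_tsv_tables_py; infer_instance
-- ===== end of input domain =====

-- B replaces A's two-pass collect-blocks-then-parse with a single fused pass that emits each
-- parsed table as soon as its run of tab-lines ends (objective: simpler decomposition, same cost).

-- ===== PORT A =====
def parseBlockA (block : List String) : List String × List (List String) :=
  (((PySem.Str.split? ((PySem.List.pyGet? block 0).getD "") "\t").getD []).map PySem.Str.strip,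
   (PySem.List.slice block (some 1) none).map
     (fun line => ((PySem.Str.split? line "\t").getD []).map PySem.Str.strip))

def stepA (st : List (List String) × List String) (line : String) :
    List (List String) × List String :=
  if PySem.Str.isIn "\t" line then (st.1, st.2 ++ [line])
  else if st.2 != [] then (st.1 ++ [st.2], ([] : List String)) else st

def find_tsv_tables_py (text : String) : List (List String × List (List String)) :=
  if text == "" then []
  else
    let lines := ((PySem.Str.splitlines text).filter
        (fun l => PySem.Str.strip l != "")).map PySem.Str.strip
    if lines == [] then []
    else
      let st := lines.foldl stepA ([], [])
      let blocks := if st.2 != [] then st.1 ++ [st.2] else st.1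
      blocks.foldl (fun tables block => tables ++ [parseBlockA block]) []

-- ===== PORT B =====
def parseRowB (line : String) : List String :=
  ((PySem.Str.split? line "\t").getD []).map PySem.Str.strip

-- the outer while of Source B is this recursion; the inner "scan the run j..": takeWhile/dropWhile
def groupB : List String → List (List String × List (List String))
  | [] => []
  | line :: rest =>
    if PySem.Str.isIn "\t" line then
      (parseRowB line,
        (rest.takeWhile (fun l => PySem.Str.isIn "\t" l)).map parseRowB)
        :: groupB (rest.dropWhile (fun l => PySem.Str.isIn "\t" l))
    else groupB rest
termination_by ls => ls.length
decreasing_by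
  · exact Nat.lt_succ_of_le (List.length_dropWhile_le _ _)
  · simp

def find_tsv_tables_py_alt (text : String) : List (List String × List (List String)) :=
  groupB (((PySem.Str.splitlines text).filter
      (fun l => PySem.Str.strip l != "")).map PySem.Str.strip)

-- ===== PRECONDITION & SPEC =====
def Spec_find_tsv_tables_py (text : String) (out : List (List String × List (List String))) : Prop := out = find_tsv_tables_py_alt text
instance (text : String) (out : List (List String × List (List String))) : Decidable (Spec_find_tsv_tables_py text out) := by unfold Spec_find_tsv_tables_py; infer_instance

-- ===== CLAIM (what is proved, stated in full; the proofs are below) =====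
def Claim_equal_find_tsv_tables_py : Prop := ∀ (text : String), Dom_find_tsv_tables_py text → Spec_find_tsv_tables_py text (find_tsv_tables_py text)

-- ===== LEMMAS AND PROOFS =====

lemma groupB_nil : groupB [] = [] := by rw [groupB]

lemma groupB_cons_pos (line : String) (rest : List String)
    (h : PySem.Str.isIn "\t" line = true) :
    groupB (line :: rest) =
      (parseRowB line,
        (rest.takeWhile (fun l => PySem.Str.isIn "\t" l)).map parseRowB)
        :: groupB (rest.dropWhile (fun l => PySem.Str.isIn "\t" l)) := by
  rw [groupB, if_pos h]

lemma groupB_cons_neg (line : String) (rest : List String)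
    (h : PySem.Str.isIn "\t" line = false) :
    groupB (line :: rest) = groupB rest := by
  rw [groupB, if_neg (by rw [h]; decide)]

lemma foldl_snoc_map (bs : List (List String)) (acc : List (List String × List (List String))) :
    bs.foldl (fun tables block => tables ++ [parseBlockA block]) acc = acc ++ bs.map parseBlockA := by
  induction bs generalizing acc with
  | nil => simp
  | cons b bs ih => simp [List.foldl_cons, ih]

lemma run_fold (run : List String) (h : ∀ l ∈ run, PySem.Str.isIn "\t" l = true)
    (bs : List (List String)) (cur : List String) :
    run.foldl stepA (bs, cur) = (bs, cur ++ run) := by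
  induction run generalizing cur with
  | nil => simp
  | cons r rs ih =>
    have hr : PySem.Str.isIn "\t" r = true := h r (by simp)
    rw [List.foldl_cons]
    have hstep : stepA (bs, cur) r = (bs, cur ++ [r]) := by
      simp only [stepA]; rw [if_pos hr]
    rw [hstep, ih (fun l hl => h l (by simp [hl]))]
    simp

lemma parseBlockA_cons (line : String) (run : List String) :
    parseBlockA (line :: run) = (parseRowB line, run.map parseRowB) := by
  simp [parseBlockA, parseRowB, PySem.List.pyGet?, PySem.List.pyIdx?, PySem.List.slice]

lemma dropWhile_head_false {α : Type} (p : α → Bool) (l : List α) (x : α) (xs : List α)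
    (h : l.dropWhile p = x :: xs) : p x = false := by
  induction l with
  | nil => simp at h
  | cons a l ih =>
    rw [List.dropWhile_cons] at h
    by_cases ha : p a = true
    · rw [if_pos ha] at h; exact ih h
    · rw [if_neg ha] at h
      injection h with h1 h2
      subst h1
      simpa using ha

lemma main_lemma (n : Nat) : ∀ (ls : List String), ls.length ≤ n → ∀ (bs : List (List String)),
    (if (ls.foldl stepA (bs, [])).2 != [] then
        (ls.foldl stepA (bs, [])).1 ++ [(ls.foldl stepA (bs, [])).2]
      else (ls.foldl stepA (bs, [])).1).map parseBlockA
    = bs.map parseBlockA ++ groupB ls := by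
  induction n with
  | zero =>
    intro ls hls bs
    have : ls = [] := List.eq_nil_of_length_eq_zero (Nat.le_zero.mp hls)
    subst this
    simp [groupB_nil]
  | succ n ih =>
    intro ls hls bs
    match ls with
    | [] => simp [groupB_nil]
    | line :: rest =>
      by_cases ht : PySem.Str.isIn "\t" line = true
      · have hsplit : rest = rest.takeWhile (fun l => PySem.Str.isIn "\t" l)
            ++ rest.dropWhile (fun l => PySem.Str.isIn "\t" l) :=
          (List.takeWhile_append_dropWhile).symm
        set run := rest.takeWhile (fun l => PySem.Str.isIn "\t" l) with hrun
        set rest' := rest.dropWhile (fun l => PySem.Str.isIn "\t" l) with hrest'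
        have hrunt : ∀ l ∈ run, PySem.Str.isIn "\t" l = true := by
          intro l hl; exact List.mem_takeWhile_imp hl
        have hstep1 : stepA (bs, []) line = (bs, [line]) := by
          simp only [stepA]; rw [if_pos ht]
          simp
        have hfold : (line :: rest).foldl stepA (bs, []) =
            rest'.foldl stepA (bs, line :: run) := by
          rw [List.foldl_cons, hstep1]
          conv_lhs => rw [hsplit]
          rw [List.foldl_append, run_fold run hrunt]
          simp
        have hgroup : groupB (line :: rest) =
            (parseRowB line, run.map parseRowB) :: groupB rest' := by
          rw [groupB_cons_pos line rest ht]
        match hr : rest' with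
        | [] =>
          rw [hfold, hgroup]
          simp only [List.foldl_nil]
          rw [if_pos (by simp)]
          rw [List.map_append]
          simp [parseBlockA_cons, groupB_nil]
        | x :: xs =>
          have hdrop : rest.dropWhile (fun l => PySem.Str.isIn "\t" l) = x :: xs := by
            exact hrest'.symm
          have hx : PySem.Str.isIn "\t" x = false :=
            dropWhile_head_false _ rest x xs hdrop
          have hstep2 : stepA (bs, line :: run) x = (bs ++ [line :: run], []) := by
            simp only [stepA]
            rw [if_neg (by rw [hx]; decide), if_pos (by simp)]
          have hlen : xs.length ≤ n := by
            have h1 : rest'.length ≤ rest.length := List.length_dropWhile_le _ _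
            rw [hr] at h1
            simp only [List.length_cons] at hls h1
            omega
          rw [hfold, List.foldl_cons, hstep2, ih xs hlen (bs ++ [line :: run]), hgroup,
            groupB_cons_neg x xs hx]
          rw [List.map_append]
          simp [parseBlockA_cons]
      · have ht' : PySem.Str.isIn "\t" line = false := by
          simpa using ht
        have hstep : stepA (bs, []) line = (bs, []) := by
          simp only [stepA]
          rw [if_neg (by rw [ht']; decide), if_neg (by simp)]
        rw [List.foldl_cons, hstep, groupB_cons_neg line rest ht']
        exact ih rest (by simpa using Nat.le_of_succ_le_succ hls) bs

-- ===== VERDICT (by name: the statement is the Claim_ definition above) =====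
theorem find_tsv_tables_py_spec : Claim_equal_find_tsv_tables_py := by
  intro text _
  unfold Spec_find_tsv_tables_py find_tsv_tables_py find_tsv_tables_py_alt
  by_cases h0 : text == ""
  · have htext : text = "" := by simpa using h0
    subst htext
    have hlines : (((PySem.Str.splitlines "").filter
        (fun l => PySem.Str.strip l != "")).map PySem.Str.strip) = [] := rfl
    rw [hlines]
    simp [groupB_nil]
  · simp only [h0, Bool.false_eq_true, if_false]
    set ls := ((PySem.Str.splitlines text).filter
        (fun l => PySem.Str.strip l != "")).map PySem.Str.strip with hls
    by_cases h1 : ls == []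
    · have : ls = [] := by simpa using h1
      rw [this]
      simp [groupB_nil]
    · simp only [h1, Bool.false_eq_true, if_false]
      rw [foldl_snoc_map, List.nil_append]
      have hmain := main_lemma ls.length ls le_rfl []
      simpa using hmain
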